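-- pv_equiv track=rewrite | github.com/pypi-data/pypi-mirror-391 | packages/wistx-mcp/wistx_mcp-1.0.1.tar.gz/wistx_mcp-1.0.1/data_pipelines/processors/document_processor.py | _extract_control_id
-- ===== SOURCE A (Python) =====
-- def _extract_control_id(line: str, standard: str) -> str | None:
--     """Extract control ID from a line of text.
--
--     Args:
--         line: Text line
--         standard: Compliance standard name
--
--     Returns:
--         Control ID or None
--     """
--     line_upper = line.upper()
--
--     if standard.upper() == "PCI-DSS":
--         if "REQUIREMENT" in line_upper or "REQ" in line_upper:
--             parts = line.split()
--             for i, part in enumerate(parts):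
--                 if part.upper().startswith("REQ") or part.upper().startswith("REQUIREMENT"):
--                     if i + 1 < len(parts):
--                         return f"PCI-DSS-{parts[i+1]}"
--     elif standard.upper() == "CIS":
--         if "CIS" in line_upper or "BENCHMARK" in line_upper:
--             parts = line.split()
--             for part in parts:
--                 if part.startswith(("CIS-", "CIS.", "CIS_")):
--                     return part.replace(".", "-").replace("_", "-")
--
--     return None
-- ===== SOURCE B (Python) =====
-- def _extract_control_id(line: str, standard: str) -> str | None:
--     """Extract control ID from a line of text (first-match scan, no index bookkeeping)."""
--     std = standard.upper()
--     if std == "PCI-DSS":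
--         parts = line.split()
--         return next((f"PCI-DSS-{nxt}" for cur, nxt in zip(parts, parts[1:])
--                      if cur.upper().startswith("REQ")), None)
--     if std == "CIS":
--         return next((p.replace(".", "-").replace("_", "-") for p in line.split()
--                      if p[:4] in ("CIS-", "CIS.", "CIS_")), None)
--     return None
-- ===== Notes on version B (the rewrite author's own statement) =====
-- stated objective: simpler
-- what changed: Replaces A's indexed enumerate loop with its i+1 bound check and lookup, plus the redundant 'in line_upper' substring pre-guards (proved redundant), by a single first-match scan: next() over zip(parts, parts[1:]) adjacent pairs for PCI-DSS and next() over a slice-membership filter for CIS.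
import Mathlib
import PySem

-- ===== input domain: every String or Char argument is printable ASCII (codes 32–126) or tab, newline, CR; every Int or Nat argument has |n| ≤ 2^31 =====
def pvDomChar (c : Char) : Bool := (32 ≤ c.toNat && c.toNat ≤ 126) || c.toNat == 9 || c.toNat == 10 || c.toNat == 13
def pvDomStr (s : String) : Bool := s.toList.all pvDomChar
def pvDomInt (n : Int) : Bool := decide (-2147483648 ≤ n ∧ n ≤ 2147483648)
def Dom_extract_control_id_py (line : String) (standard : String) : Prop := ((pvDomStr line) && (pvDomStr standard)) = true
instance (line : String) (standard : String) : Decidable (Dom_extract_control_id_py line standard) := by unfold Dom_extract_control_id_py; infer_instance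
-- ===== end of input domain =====

-- B drops A's redundant substring pre-guards and replaces the indexed enumerate loop by a
-- first-match scan over adjacent token pairs (objective: simpler; same return value everywhere).

-- ===== PORT A =====
-- 'for i, part in enumerate(parts)': recursion over the remaining tokens carrying the index i
def pvAPciLoop (parts : List String) (i : Nat) (todo : List String) : Option String :=
  match todo with
  | [] => none
  | part :: rest =>
    if PySem.Str.startswith (PySem.Str.upper part) "REQ"
        || PySem.Str.startswith (PySem.Str.upper part) "REQUIREMENT" then
      if i + 1 < parts.length then
        some ("PCI-DSS-" ++ ((PySem.List.pyGet? parts ((i : Int) + 1)).getD ""))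
      else pvAPciLoop parts (i + 1) rest
    else pvAPciLoop parts (i + 1) rest

-- 'for part in parts' of the CIS branch
def pvACisLoop (todo : List String) : Option String :=
  match todo with
  | [] => none
  | part :: rest =>
    if PySem.Str.startswith part "CIS-" || PySem.Str.startswith part "CIS."
        || PySem.Str.startswith part "CIS_" then
      some (PySem.Str.replace (PySem.Str.replace part "." "-") "_" "-")
    else pvACisLoop rest

def extract_control_id_py (line : String) (standard : String) : Option String :=
  let line_upper := PySem.Str.upper line
  if PySem.Str.upper standard == "PCI-DSS" then
    if PySem.Str.isIn "REQUIREMENT" line_upper || PySem.Str.isIn "REQ" line_upper then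
      pvAPciLoop (PySem.Str.split₀ line) 0 (PySem.Str.split₀ line)
    else none
  else if PySem.Str.upper standard == "CIS" then
    if PySem.Str.isIn "CIS" line_upper || PySem.Str.isIn "BENCHMARK" line_upper then
      pvACisLoop (PySem.Str.split₀ line)
    else none
  else none

-- ===== PORT B =====
def pvBPciHit (pr : String × String) : Bool :=
  PySem.Str.startswith (PySem.Str.upper pr.1) "REQ"

def pvBCisHit (p : String) : Bool :=
  decide (PySem.Str.slice p none (some 4) ∈ ["CIS-", "CIS.", "CIS_"])

def extract_control_id_py_alt (line : String) (standard : String) : Option String :=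
  let std := PySem.Str.upper standard
  if std == "PCI-DSS" then
    let parts := PySem.Str.split₀ line
    ((parts.zip (PySem.List.slice parts (some 1) none)).find? pvBPciHit).map
      (fun pr => "PCI-DSS-" ++ pr.2)
  else if std == "CIS" then
    ((PySem.Str.split₀ line).find? pvBCisHit).map
      (fun p => PySem.Str.replace (PySem.Str.replace p "." "-") "_" "-")
  else none

-- ===== PRECONDITION & SPEC =====
def Spec_extract_control_id_py (line : String) (standard : String) (out : Option String) : Prop := out = extract_control_id_py_alt line standard
instance (line : String) (standard : String) (out : Option String) : Decidable (Spec_extract_control_id_py line standard out) := by unfold Spec_extract_control_id_py; infer_instance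

-- ===== CLAIM (what is proved, stated in full; the proofs are below) =====
def Claim_equal_extract_control_id_py : Prop := ∀ (line : String) (standard : String), Dom_extract_control_id_py line standard → Spec_extract_control_id_py line standard (extract_control_id_py line standard)

-- ===== LEMMAS AND PROOFS =====

-- every token produced by str.split() is an infix of the original string
theorem pv_split_go_infix (rest : List Char) : ∀ (cur : List Char) (acc : List (List Char))
    (t : List Char), t ∈ PySem.Chars.split₀.go rest cur acc →
    t ∈ acc ∨ t <:+: (cur.reverse ++ rest) := by
  induction rest with
  | nil =>
    intro cur acc t h
    simp only [PySem.Chars.split₀.go] at h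
    split at h
    · exact Or.inl (by simpa using h)
    · rcases (by simpa using h : t ∈ acc ∨ t = cur.reverse) with h | h
      · exact Or.inl h
      · exact Or.inr ⟨[], [], by simp [h]⟩
  | cons c rest ih =>
    intro cur acc t h
    simp only [PySem.Chars.split₀.go] at h
    by_cases hsp : PySem.Chars.isspace c = true
    · rw [if_pos hsp] at h
      by_cases hcur : cur.isEmpty = true
      · rw [if_pos hcur] at h
        rcases ih [] acc t h with h' | h'
        · exact Or.inl h'
        · refine Or.inr (h'.trans ?_)
          exact ⟨cur.reverse ++ [c], [], by simp⟩
      · rw [if_neg hcur] at h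
        rcases ih [] (cur.reverse :: acc) t h with h' | h'
        · rcases List.mem_cons.mp h' with h'' | h''
          · exact Or.inr (by rw [h'']; exact ⟨[], c :: rest, by simp⟩)
          · exact Or.inl h''
        · refine Or.inr (h'.trans ?_)
          exact ⟨cur.reverse ++ [c], [], by simp⟩
    · rw [if_neg hsp] at h
      rcases ih (c :: cur) acc t h with h' | h'
      · exact Or.inl h'
      · exact Or.inr (by simpa using h')

theorem pv_mem_split₀_infix (t cs : List Char) (h : t ∈ PySem.Chars.split₀ cs) : t <:+: cs := by
  rcases pv_split_go_infix cs [] [] t h with h' | h'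
  · simp at h'
  · simpa using h'

theorem pv_mem_split₀_str (p line : String) (h : p ∈ PySem.Str.split₀ line) :
    p.toList <:+: line.toList := by
  apply pv_mem_split₀_infix
  rw [← PySem.Str.split₀_map_toList]
  exact List.mem_map_of_mem h

-- a token whose upper-case form starts with "REQ" forces "REQ" into upper(line)
theorem pv_req_guard (p line : String) (hp : p ∈ PySem.Str.split₀ line)
    (h : PySem.Str.startswith (PySem.Str.upper p) "REQ" = true) :
    PySem.Str.isIn "REQ" (PySem.Str.upper line) = true := by
  rw [PySem.Str.isIn_iff_infix]
  have h1 : ("REQ".toList) <+: (PySem.Str.upper p).toList := by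
    rw [PySem.Str.startswith_eq, PySem.Chars.startswith_iff] at h
    simpa using h
  have h2 : (PySem.Str.upper p).toList <:+: (PySem.Str.upper line).toList := by
    simp only [PySem.Str.toList_upper, PySem.Chars.upper]
    exact (pv_mem_split₀_str p line hp).map _
  simpa using h1.isInfix.trans h2

-- the first four characters of a token, as A's startswith test and as B's slice test
theorem pv_take4 (p lit : String) (hlen : lit.toList.length = 4) :
    (PySem.Str.startswith p lit = true) ↔ PySem.Str.slice p none (some 4) = lit := by
  have hsl : (PySem.Str.slice p none (some 4)).toList = p.toList.take 4 := by
    rw [PySem.Str.toList_slice, PySem.Chars.slice_eq_listSlice,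
      PySem.List.slice_to _ (by norm_num)]
    rfl
  rw [PySem.Str.startswith_eq, PySem.Chars.startswith_iff, List.prefix_iff_eq_take, hlen,
    ← String.toList_inj, hsl]
  exact eq_comm

-- a token starting with "CIS-"/"CIS."/"CIS_" forces "CIS" into upper(line)
theorem pv_cis_guard (p line : String) (hp : p ∈ PySem.Str.split₀ line)
    (h : pvBCisHit p = true) :
    PySem.Str.isIn "CIS" (PySem.Str.upper line) = true := by
  rw [PySem.Str.isIn_iff_infix]
  have h1 : ("CIS".toList) <+: p.toList := by
    unfold pvBCisHit at h
    have hm := of_decide_eq_true h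
    simp only [List.mem_cons, List.not_mem_nil, or_false] at hm
    have h4 : PySem.Str.startswith p "CIS-" = true ∨ PySem.Str.startswith p "CIS." = true ∨
        PySem.Str.startswith p "CIS_" = true := by
      rcases hm with h' | h' | h'
      · exact Or.inl ((pv_take4 p _ (by decide)).mpr h')
      · exact Or.inr (Or.inl ((pv_take4 p _ (by decide)).mpr h'))
      · exact Or.inr (Or.inr ((pv_take4 p _ (by decide)).mpr h'))
    have hpre : ∀ lit : String, ("CIS".toList) <+: lit.toList →
        PySem.Str.startswith p lit = true → ("CIS".toList) <+: p.toList := by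
      intro lit hl hs
      rw [PySem.Str.startswith_eq, PySem.Chars.startswith_iff] at hs
      exact hl.trans hs
    rcases h4 with h' | h' | h'
    · exact hpre _ (by decide) h'
    · exact hpre _ (by decide) h'
    · exact hpre _ (by decide) h'
  have hup : ("CIS".toList) <+: (PySem.Str.upper p).toList := by
    simp only [PySem.Str.toList_upper, PySem.Chars.upper]
    have := h1.map PySem.Chars.upperChar
    simpa using this
  have h3 : (PySem.Str.upper p).toList <:+: (PySem.Str.upper line).toList := by
    simp only [PySem.Str.toList_upper, PySem.Chars.upper]
    exact (pv_mem_split₀_str p line hp).map _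
  simpa using hup.isInfix.trans h3

-- "REQUIREMENT" begins with "REQ", so A's second test is subsumed by the first
theorem pv_requirement_imp (p : String)
    (hc : PySem.Str.startswith (PySem.Str.upper p) "REQUIREMENT" = true) :
    PySem.Str.startswith (PySem.Str.upper p) "REQ" = true := by
  rw [PySem.Str.startswith_eq, PySem.Chars.startswith_iff] at hc ⊢
  exact List.IsPrefix.trans (by decide) hc

-- A's PCI token test equals B's
theorem pv_pci_cond (p : String) :
    (PySem.Str.startswith (PySem.Str.upper p) "REQ"
      || PySem.Str.startswith (PySem.Str.upper p) "REQUIREMENT")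
    = PySem.Str.startswith (PySem.Str.upper p) "REQ" := by
  cases h : PySem.Str.startswith (PySem.Str.upper p) "REQ" with
  | true => simp
  | false =>
    rw [Bool.false_or]
    cases h2 : PySem.Str.startswith (PySem.Str.upper p) "REQUIREMENT" with
    | false => rfl
    | true => rw [pv_requirement_imp p h2] at h; cases h
  
-- A's CIS token test equals B's
theorem pv_cis_cond (p : String) :
    (PySem.Str.startswith p "CIS-" || PySem.Str.startswith p "CIS."
      || PySem.Str.startswith p "CIS_") = pvBCisHit p := by
  rw [Bool.eq_iff_iff]
  unfold pvBCisHit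
  simp only [Bool.or_eq_true, decide_eq_true_eq, List.mem_cons, List.not_mem_nil, or_false]
  rw [pv_take4 p "CIS-" (by decide), pv_take4 p "CIS." (by decide), pv_take4 p "CIS_" (by decide)]
  tauto

-- the PCI loops agree
theorem pv_pci_loop (parts : List String) : ∀ (todo : List String) (i : Nat),
    todo = parts.drop i →
    pvAPciLoop parts i todo
      = ((todo.zip todo.tail).find? pvBPciHit).map (fun pr => "PCI-DSS-" ++ pr.2) := by
  intro todo
  induction todo with
  | nil => intro i _; simp [pvAPciLoop]
  | cons part rest ih =>
    intro i hdrop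
    have hrest : rest = parts.drop (i + 1) := by
      have : parts.drop (i + 1) = (parts.drop i).drop 1 := by
        rw [List.drop_drop]
      rw [this, ← hdrop]
      rfl
    have hcond := pv_pci_cond part
    simp only [pvAPciLoop, hcond]
    cases hhit : PySem.Str.startswith (PySem.Str.upper part) "REQ" with
    | true =>
      cases rest with
      | nil =>
        have hlen : ¬ i + 1 < parts.length := by
          have := hrest.symm
          rw [List.drop_eq_nil_iff] at this
          omega
        simp [hlen, pvAPciLoop, List.zip]
      | cons b rest' =>
        have hlen : i + 1 < parts.length := by
          by_contra hc
          have : parts.drop (i + 1) = [] := List.drop_eq_nil_iff.mpr (by omega)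
          rw [← hrest] at this
          exact List.cons_ne_nil _ _ this
        have hget : PySem.List.pyGet? parts ((i : Int) + 1) = some b := by
          have h0 : ((i : Int) + 1) = ((i + 1 : Nat) : Int) := by push_cast; ring
          rw [h0, PySem.List.pyGet?_natCast]
          have : parts[i+1]? = (parts.drop (i+1))[0]? := by
            rw [List.getElem?_drop]
          rw [this, ← hrest]
          rfl
        have hhit' : PySem.Chars.startswith (PySem.Chars.upper part.toList) ['R','E','Q'] = true := by
          simpa using hhit
        have hfind : ((part :: b :: rest').zip (b :: rest')).find? pvBPciHit
            = some (part, b) := by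
          simp [pvBPciHit, hhit']
        simp only [List.tail_cons, hfind, hget, if_pos hlen]
        simp
    | false =>
      have hskip : pvAPciLoop parts (i + 1) rest
          = ((rest.zip rest.tail).find? pvBPciHit).map (fun pr => "PCI-DSS-" ++ pr.2) :=
        ih (i + 1) hrest
      cases rest with
      | nil => simpa [List.zip] using hskip
      | cons b rest' =>
        simp only [List.tail_cons] at hskip ⊢
        rw [hskip]
        have hhit' : PySem.Chars.startswith (PySem.Chars.upper part.toList) ['R','E','Q'] = false := by
          simpa using hhit
        have : ((part :: b :: rest').zip (b :: rest')).find? pvBPciHit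
            = ((b :: rest').zip rest').find? pvBPciHit := by
          simp [pvBPciHit, hhit']
        rw [this]
        simp

-- the CIS loops agree
theorem pv_cis_loop (todo : List String) :
    pvACisLoop todo
      = (todo.find? pvBCisHit).map
          (fun p => PySem.Str.replace (PySem.Str.replace p "." "-") "_" "-") := by
  induction todo with
  | nil => simp [pvACisLoop]
  | cons p rest ih =>
    simp only [pvACisLoop, pv_cis_cond, List.find?]
    cases h : pvBCisHit p with
    | true => simp
    | false => simpa using ih

-- split₀ line, with B's parts[1:] rewritten to List.tail
theorem pv_b_pci (line : String) :
    ((PySem.Str.split₀ line).zip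
        (PySem.List.slice (PySem.Str.split₀ line) (some 1) none)).find? pvBPciHit
    = (((PySem.Str.split₀ line)).zip ((PySem.Str.split₀ line)).tail).find? pvBPciHit := by
  rw [PySem.List.slice_from _ (by norm_num)]
  norm_num [List.drop_one]

-- ===== VERDICT (by name: the statement is the Claim_ definition above) =====
theorem extract_control_id_py_spec : Claim_equal_extract_control_id_py := by
  intro line standard _
  unfold Spec_extract_control_id_py extract_control_id_py extract_control_id_py_alt
  by_cases hstd : (PySem.Str.upper standard == "PCI-DSS") = true
  · simp only [hstd, if_true]
    rw [pv_b_pci]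
    by_cases hg : (PySem.Str.isIn "REQUIREMENT" (PySem.Str.upper line)
        || PySem.Str.isIn "REQ" (PySem.Str.upper line)) = true
    · rw [if_pos hg]
      exact pv_pci_loop (PySem.Str.split₀ line) (PySem.Str.split₀ line) 0 rfl
    · rw [if_neg hg]
      rw [Bool.or_eq_true] at hg
      rw [not_or] at hg
      have hreq : PySem.Str.isIn "REQ" (PySem.Str.upper line) ≠ true := hg.2
      have : (((PySem.Str.split₀ line)).zip ((PySem.Str.split₀ line)).tail).find? pvBPciHit
          = none := by
        rw [List.find?_eq_none]
        rintro ⟨a, b⟩ hmem hhit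
        exact hreq (pv_req_guard a line (List.of_mem_zip hmem).1 (by simpa [pvBPciHit] using hhit))
      rw [this]
      rfl
  · simp only [Bool.not_eq_true] at hstd
    simp only [hstd, Bool.false_eq_true, if_false]
    by_cases hstd2 : (PySem.Str.upper standard == "CIS") = true
    · simp only [hstd2, if_true]
      by_cases hg : (PySem.Str.isIn "CIS" (PySem.Str.upper line)
          || PySem.Str.isIn "BENCHMARK" (PySem.Str.upper line)) = true
      · rw [if_pos hg]
        exact pv_cis_loop (PySem.Str.split₀ line)
      · rw [if_neg hg]
        rw [Bool.or_eq_true] at hg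
        rw [not_or] at hg
        have hcis : PySem.Str.isIn "CIS" (PySem.Str.upper line) ≠ true := hg.1
        have : ((PySem.Str.split₀ line).find? pvBCisHit) = none := by
          rw [List.find?_eq_none]
          intro p hmem hhit
          exact hcis (pv_cis_guard p line hmem hhit)
        rw [this]
        rfl
    · simp only [Bool.not_eq_true] at hstd2
      simp only [hstd2, Bool.false_eq_true, if_false]
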